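-- pv_equiv track=rewrite | github.com/mmv2004/project | Проект/18-Intervals/a10solve.py | lastPerformedOp
-- ===== SOURCE A (Python) =====
-- def priority(op):
--     if   op == '=': return 1
--     elif op == '^': return 2
--     elif op == '+': return 3
--     elif op == '*': return 4
--     elif op == '!': return 5
--     else: return 100
--
-- def lastPerformedOp(s):
--     minPrt = 50
--     lastOp = -1
--     nest = 0
--     for i in range(len(s)):
--         if s[i] == '(':
--             nest += 1
--         elif s[i] == ')':
--             nest -= 1
--             if nest < 0:
--                 raise SyntaxError()
--         elif nest == 0   and  priority(s[i]) <= minPrt: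
--             minPrt = priority(s[i])
--             lastOp = i
--     assert(nest==0)
--     return lastOp
-- ===== SOURCE B (Python) =====
-- def priority(op):
--     if   op == '=': return 1
--     elif op == '^': return 2
--     elif op == '+': return 3
--     elif op == '*': return 4
--     elif op == '!': return 5
--     else: return 100
--
-- def lastPerformedOp(s):
--     # Phase 1: validate parentheses exactly as A does.
--     nest = 0
--     for c in s:
--         if c == '(':
--             nest += 1
--         elif c == ')':
--             nest -= 1
--             if nest < 0:
--                 raise SyntaxError()
--     assert nest == 0
--     # Phase 2: staged searches by priority level.  For each priority from the
--     # lowest (performed last) upward, scan RIGHT-TO-LEFT tracking depth and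
--     # return the first (i.e. rightmost) top-level character with that priority.
--     for p in (1, 2, 3, 4, 5):
--         depth = 0
--         for i in range(len(s) - 1, -1, -1):
--             c = s[i]
--             if c == ')':
--                 depth += 1
--             elif c == '(':
--                 depth -= 1
--             elif depth == 0 and priority(c) == p:
--                 return i
--     return -1
-- ===== Notes on version B (the rewrite author's own statement) =====
-- stated objective: alternative
-- what changed: Replaces A's single pass with running min-priority/last-index accumulators by staged searches: after a validation-only pass over the parentheses, for each priority level 1..5 in order B scans the string right-to-left tracking depth and returns the first (rightmost) top-level character of that priority, so no minimum is ever maintained.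
import Mathlib
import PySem

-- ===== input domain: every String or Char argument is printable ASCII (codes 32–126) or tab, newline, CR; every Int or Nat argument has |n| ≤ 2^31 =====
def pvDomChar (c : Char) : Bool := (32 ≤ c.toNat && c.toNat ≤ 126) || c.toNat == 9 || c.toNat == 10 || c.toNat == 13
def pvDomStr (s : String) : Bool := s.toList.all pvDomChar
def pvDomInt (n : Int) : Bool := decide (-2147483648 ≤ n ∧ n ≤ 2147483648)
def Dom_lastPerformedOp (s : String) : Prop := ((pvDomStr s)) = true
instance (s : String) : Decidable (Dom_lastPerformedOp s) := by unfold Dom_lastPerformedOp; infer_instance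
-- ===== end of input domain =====

-- B replaces A's running min/lastOp accumulators by staged right-to-left searches, one
-- per priority level 1..5; same return value on every balanced input (Pre_).

-- ===== PORT A =====
def prio (op : Char) : Int :=
  if op = '=' then 1
  else if op = '^' then 2
  else if op = '+' then 3
  else if op = '*' then 4
  else if op = '!' then 5
  else 100

-- A's for-loop over range(len(s)); state (minPrt, lastOp, nest).  The 'raise' on
-- nest < 0 and the final 'assert nest == 0' are exactly the inputs Pre_ excludes.
def aLoop : List Char → Int → Int × Int × Int → Int × Int × Int
  | [], _, st => st
  | c :: rest, i, (m, l, n) =>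
      if c = '(' then aLoop rest (i + 1) (m, l, n + 1)
      else if c = ')' then aLoop rest (i + 1) (m, l, n - 1)
      else if n = 0 ∧ prio c ≤ m then aLoop rest (i + 1) (prio c, i, n)
      else aLoop rest (i + 1) (m, l, n)

def lastPerformedOp (s : String) : Int := (aLoop s.toList 0 (50, -1, 0)).2.1

-- ===== PORT B =====
-- Source B's inner right-to-left scan for one priority level p: the list is the string
-- reversed, i the index of the current (rightmost unseen) character, depth as in Source B.
def bScanR : List Char → Int → Int → Int → Option Int
  | [], _, _, _ => none
  | c :: rest, i, depth, p =>
      if c = ')' then bScanR rest (i - 1) (depth + 1) p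
      else if c = '(' then bScanR rest (i - 1) (depth - 1) p
      else if depth = 0 ∧ prio c = p then some i
      else bScanR rest (i - 1) depth p

-- Source B's outer 'for p in (1,2,3,4,5)' loop with its early return
def bTry : List Int → List Char → Int → Int
  | [], _, _ => -1
  | p :: ps, cs, n =>
      match bScanR cs (n - 1) 0 p with
      | some i => i
      | none => bTry ps cs n

-- Source B's phase-1 validation loop only raises or passes (its inputs that raise are
-- outside Pre_), so the returned value is phase 2:
def lastPerformedOp_alt (s : String) : Int :=
  bTry [1, 2, 3, 4, 5] s.toList.reverse (s.toList.length : Int)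

-- ===== PRECONDITION & SPEC =====
-- Pre_ excludes exactly the inputs where A raises: a prefix with more ')' than '('
-- (SyntaxError) or an unbalanced total (AssertionError).
def Pre_lastPerformedOp (s : String) : Prop :=
  (∀ k : Nat, k ≤ s.toList.length →
      (s.toList.take k).count ')' ≤ (s.toList.take k).count '(') ∧
  s.toList.count '(' = s.toList.count ')'
instance (s : String) : Decidable (Pre_lastPerformedOp s) := by
  unfold Pre_lastPerformedOp; infer_instance

def pvWitness_lastPerformedOp : String := "(a+b)*c"

def Spec_lastPerformedOp (s : String) (out : Int) : Prop := out = lastPerformedOp_alt s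
instance (s : String) (out : Int) : Decidable (Spec_lastPerformedOp s out) := by unfold Spec_lastPerformedOp; infer_instance

-- ===== CLAIM (what is proved, stated in full; the proofs are below) =====
def Claim_equal_lastPerformedOp : Prop := ∀ (s : String), Dom_lastPerformedOp s → Pre_lastPerformedOp s → Spec_lastPerformedOp s (lastPerformedOp s)

-- ===== LEMMAS AND PROOFS =====

-- the candidate list A's loop effectively selects from: (priority, index) of every
-- character at nesting 0 whose priority is ≤ 50, indices from i, nesting from n
def candList : List Char → Int → Int → List (Int × Int)
  | [], _, _ => []
  | c :: rest, i, n =>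
      if c = '(' then candList rest (i + 1) (n + 1)
      else if c = ')' then candList rest (i + 1) (n - 1)
      else if n = 0 ∧ prio c ≤ 50 then (prio c, i) :: candList rest (i + 1) n
      else candList rest (i + 1) n

-- left-to-right 'last top-level char of priority p' reference for bScanR
def lastFind : List Char → Int → Int → Int → Option Int
  | [], _, _, _ => none
  | c :: rest, i, n, p =>
      if c = '(' then lastFind rest (i + 1) (n + 1) p
      else if c = ')' then lastFind rest (i + 1) (n - 1) p
      else match lastFind rest (i + 1) n p with
        | some j => some j
        | none => if n = 0 ∧ prio c = p then some i else none

-- last value with key p in an increasing-index candidate list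
def lookupLast (p : Int) : List (Int × Int) → Option Int
  | [] => none
  | y :: ys => match lookupLast p ys with
      | some j => some j
      | none => if y.1 = p then some y.2 else none

def net : List Char → Int
  | [] => 0
  | c :: rest => ((if c = '(' then 1 else 0) - (if c = ')' then 1 else 0)) + net rest

lemma net_append (xs ys : List Char) : net (xs ++ ys) = net xs + net ys := by
  induction xs with
  | nil => simp [net]
  | cons c rest ih => simp [net, ih]; ring

lemma net_eq_count (cs : List Char) :
    net cs = (cs.count '(' : Int) - (cs.count ')' : Int) := by
  induction cs with
  | nil => simp [net]
  | cons c rest ih =>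
      simp only [net, ih, List.count_cons]
      by_cases h1 : c = '(' <;> by_cases h2 : c = ')' <;>
        simp [h1, h2] <;> push_cast <;> omega

lemma prio_bounds (c : Char) (h : prio c ≤ 50) : 1 ≤ prio c ∧ prio c ≤ 5 := by
  unfold prio at h ⊢; split_ifs at h ⊢ <;> omega

lemma candList_fst_bounds (cs : List Char) (i n : Int) :
    ∀ y ∈ candList cs i n, 1 ≤ y.1 ∧ y.1 ≤ 5 := by
  induction cs generalizing i n with
  | nil => simp [candList]
  | cons c rest ih =>
      intro y hy
      simp only [candList] at hy
      split_ifs at hy with h1 h2 h3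
      · exact ih _ _ y hy
      · exact ih _ _ y hy
      · rw [List.mem_cons] at hy
        rcases hy with rfl | hy
        · exact prio_bounds c h3.2
        · exact ih _ _ y hy
      · exact ih _ _ y hy

lemma candList_snd_ge (cs : List Char) (i n : Int) :
    ∀ y ∈ candList cs i n, i ≤ y.2 := by
  induction cs generalizing i n with
  | nil => simp [candList]
  | cons c rest ih =>
      intro y hy
      simp only [candList] at hy
      split_ifs at hy with h1 h2 h3
      · have := ih (i + 1) (n + 1) y hy; omega
      · have := ih (i + 1) (n - 1) y hy; omega
      · rw [List.mem_cons] at hy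
        rcases hy with rfl | hy
        · omega
        · have := ih (i + 1) n y hy; omega
      · have := ih (i + 1) n y hy; omega

lemma candList_pairwise (cs : List Char) (i n : Int) :
    (candList cs i n).Pairwise (fun a b => a.2 < b.2) := by
  induction cs generalizing i n with
  | nil => simp [candList]
  | cons c rest ih =>
      simp only [candList]
      split_ifs with h1 h2 h3
      · exact ih _ _
      · exact ih _ _
      · refine List.pairwise_cons.mpr ⟨?_, ih _ _⟩
        intro y hy
        have := candList_snd_ge rest (i + 1) n y hy
        simp only; omega
      · exact ih _ _

-- A's loop = fold of the running-min step over candList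
lemma aLoop_eq_fold (cs : List Char) (i n m l : Int) (hm : m ≤ 50) :
    ((aLoop cs i (m, l, n)).1, (aLoop cs i (m, l, n)).2.1) =
      List.foldl (fun a y => if y.1 ≤ a.1 then y else a) (m, l) (candList cs i n) := by
  induction cs generalizing i n m l with
  | nil => simp [aLoop, candList]
  | cons c rest ih =>
      simp only [aLoop, candList]
      by_cases h1 : c = '('
      · simp only [if_pos h1]; exact ih _ _ _ _ hm
      · by_cases h2 : c = ')'
        · simp only [if_neg h1, if_pos h2]; exact ih _ _ _ _ hm
        · simp only [if_neg h1, if_neg h2]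
          by_cases hA : n = 0 ∧ prio c ≤ m
          · have hB : n = 0 ∧ prio c ≤ 50 := ⟨hA.1, le_trans hA.2 hm⟩
            rw [if_pos hA, if_pos hB, List.foldl_cons, if_pos hA.2]
            exact ih _ _ _ _ (le_trans hA.2 hm)
          · rw [if_neg hA]
            by_cases hB : n = 0 ∧ prio c ≤ 50
            · have hp : ¬ prio c ≤ m := fun h => hA ⟨hB.1, h⟩
              rw [if_pos hB, List.foldl_cons, if_neg hp]
              exact ih _ _ _ _ hm
            · rw [if_neg hB]; exact ih _ _ _ _ hm

-- snoc step for lastFind: the appended last character is checked first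
lemma lastFind_snoc (xs : List Char) (c : Char) (p : Int) :
    ∀ i n : Int, lastFind (xs ++ [c]) i n p =
      if (¬ c = '(' ∧ ¬ c = ')') ∧ n + net xs = 0 ∧ prio c = p
      then some (i + (xs.length : Int))
      else lastFind xs i n p := by
  induction xs with
  | nil =>
      intro i n
      simp only [List.nil_append, lastFind, net, List.length_nil, add_zero]
      by_cases h1 : c = '('
      · simp [lastFind, h1]
      · by_cases h2 : c = ')'
        · simp [lastFind, h1, h2]
        · simp only [if_neg h1, if_neg h2]
          by_cases hc : n = 0 ∧ prio c = p
          · rw [if_pos hc, if_pos ⟨⟨h1, h2⟩, hc.1, hc.2⟩]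
            norm_num
          · rw [if_neg hc, if_neg (by rintro ⟨_, hn, hp⟩; exact hc ⟨hn, hp⟩)]
  | cons x xs' ih =>
      intro i n
      by_cases h1 : x = '('
      · have hnet : net (x :: xs') = 1 + net xs' := by simp [net, h1]
        have hL : lastFind ((x :: xs') ++ [c]) i n p = lastFind (xs' ++ [c]) (i + 1) (n + 1) p := by
          simp only [List.cons_append, lastFind, if_pos h1]
        have hR : lastFind (x :: xs') i n p = lastFind xs' (i + 1) (n + 1) p := by
          simp only [lastFind, if_pos h1]
        rw [hL, ih]
        by_cases hc : (¬ c = '(' ∧ ¬ c = ')') ∧ (n + 1) + net xs' = 0 ∧ prio c = p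
        · rw [if_pos hc, if_pos ⟨hc.1, by have := hc.2.1; omega, hc.2.2⟩]
          congr 1
          simp only [List.length_cons]
          push_cast
          ring
        · rw [if_neg hc, if_neg (by rintro ⟨ha, hn, hp⟩; rw [hnet] at hn; exact hc ⟨ha, by omega, hp⟩), hR]
      · by_cases h2 : x = ')'
        · have hnet : net (x :: xs') = -1 + net xs' := by simp [net, h1, h2]
          have hL : lastFind ((x :: xs') ++ [c]) i n p = lastFind (xs' ++ [c]) (i + 1) (n - 1) p := by
            simp only [List.cons_append, lastFind, if_neg (by simp [h2] : ¬ x = '('), if_pos h2]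
          have hR : lastFind (x :: xs') i n p = lastFind xs' (i + 1) (n - 1) p := by
            simp only [lastFind, if_neg (by simp [h2] : ¬ x = '('), if_pos h2]
          rw [hL, ih]
          by_cases hc : (¬ c = '(' ∧ ¬ c = ')') ∧ (n - 1) + net xs' = 0 ∧ prio c = p
          · rw [if_pos hc, if_pos ⟨hc.1, by have := hc.2.1; omega, hc.2.2⟩]
            congr 1
            simp only [List.length_cons]
            push_cast
            ring
          · rw [if_neg hc, if_neg (by rintro ⟨ha, hn, hp⟩; rw [hnet] at hn; exact hc ⟨ha, by omega, hp⟩), hR]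
        · have hnet : net (x :: xs') = net xs' := by simp [net, h1, h2]
          have hL : lastFind ((x :: xs') ++ [c]) i n p =
              match lastFind (xs' ++ [c]) (i + 1) n p with
              | some j => some j
              | none => if n = 0 ∧ prio x = p then some i else none := by
            simp only [List.cons_append, lastFind, if_neg h1, if_neg h2]
          have hR : lastFind (x :: xs') i n p =
              match lastFind xs' (i + 1) n p with
              | some j => some j
              | none => if n = 0 ∧ prio x = p then some i else none := by
            simp only [lastFind, if_neg h1, if_neg h2]
          rw [hL, ih]
          simp only [hnet]
          by_cases hc : (¬ c = '(' ∧ ¬ c = ')') ∧ n + net xs' = 0 ∧ prio c = p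
          · rw [if_pos hc, if_pos hc]
            show some (i + 1 + (xs'.length : Int)) = some (i + ((x :: xs').length : Int))
            congr 1
            simp only [List.length_cons]
            push_cast
            ring
          · rw [if_neg hc, if_neg hc, hR]

-- the right-to-left scan = left-to-right last-match search on the reversed list
lemma bScanR_eq_lastFind (l : List Char) : ∀ i d p : Int,
    bScanR l i d p =
      lastFind l.reverse (i - (l.length : Int) + 1) (d - net l.reverse) p := by
  induction l with
  | nil => intro i d p; simp [bScanR, lastFind]
  | cons c rest ih =>
      intro i d p
      rw [show (c :: rest).reverse = rest.reverse ++ [c] from by simp]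
      rw [lastFind_snoc]
      by_cases h1 : c = ')'
      · subst h1
        have hnet2 : net (rest.reverse ++ [')']) = net rest.reverse - 1 := by
          rw [net_append]; simp [net]; ring
        rw [show bScanR (')' :: rest) i d p = bScanR rest (i - 1) (d + 1) p from by
          simp [bScanR], ih]
        rw [if_neg (by simp)]
        have e1 : (i - 1) - (rest.length : Int) + 1 = i - (((')' :: rest).length : Int)) + 1 := by
          simp only [List.length_cons]; push_cast; ring
        have e2 : (d + 1) - net rest.reverse = d - net (rest.reverse ++ [')']) := by
          rw [hnet2]; ring
        rw [e1, e2]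
      · by_cases h2 : c = '('
        · subst h2
          have hnet2 : net (rest.reverse ++ ['(']) = net rest.reverse + 1 := by
            rw [net_append]; simp [net]
          rw [show bScanR ('(' :: rest) i d p = bScanR rest (i - 1) (d - 1) p from by
            simp [bScanR], ih]
          rw [if_neg (by simp)]
          have e1 : (i - 1) - (rest.length : Int) + 1 = i - ((('(' :: rest).length : Int)) + 1 := by
            simp only [List.length_cons]; push_cast; ring
          have e2 : (d - 1) - net rest.reverse = d - net (rest.reverse ++ ['(']) := by
            rw [hnet2]; ring
          rw [e1, e2]
        · have hnet2 : net (rest.reverse ++ [c]) = net rest.reverse := by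
            rw [net_append]; simp [net, h1, h2]
          rw [show bScanR (c :: rest) i d p =
              (if d = 0 ∧ prio c = p then some i else bScanR rest (i - 1) d p) from by
            simp [bScanR, h1, h2]]
          by_cases hc : d = 0 ∧ prio c = p
          · rw [if_pos hc, if_pos ⟨⟨h2, h1⟩, by rw [hnet2]; have := hc.1; omega, hc.2⟩]
            congr 1
            simp only [List.length_reverse, List.length_cons]
            push_cast
            ring
          · rw [if_neg hc,
              if_neg (by rintro ⟨_, hn, hp⟩; rw [hnet2] at hn; exact hc ⟨by omega, hp⟩), ih]
            have e1 : (i - 1) - (rest.length : Int) + 1 = i - (((c :: rest).length : Int)) + 1 := by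
              simp only [List.length_cons]; push_cast; ring
            have e2 : d - net rest.reverse = d - net (rest.reverse ++ [c]) := by
              rw [hnet2]
            rw [e1, e2]

-- lastFind = lookupLast on candList (for priorities ≤ 50)
lemma lastFind_eq_lookupLast (cs : List Char) (i n p : Int) (hp : p ≤ 50) :
    lastFind cs i n p = lookupLast p (candList cs i n) := by
  induction cs generalizing i n with
  | nil => simp [lastFind, candList, lookupLast]
  | cons c rest ih =>
      simp only [lastFind, candList]
      by_cases h1 : c = '('
      · simp [h1, ih]
      · by_cases h2 : c = ')'
        · simp [h1, h2, ih]
        · simp only [if_neg h1, if_neg h2]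
          by_cases hB : n = 0 ∧ prio c ≤ 50
          · rw [if_pos hB]
            simp only [lookupLast, ← ih]
            cases lastFind rest (i + 1) n p with
            | some j => simp
            | none =>
                simp only
                by_cases he : prio c = p
                · rw [if_pos ⟨hB.1, he⟩, if_pos he]
                · rw [if_neg (by rintro ⟨_, h⟩; exact he h), if_neg he]
          · rw [if_neg hB, ih]
            cases hn : lastFind rest (i + 1) n p with
            | some j => rw [← ih, hn]
            | none =>
                rw [← ih, hn]
                simp only
                rw [if_neg]
                rintro ⟨hn0, hpc⟩
                exact hB ⟨hn0, by omega⟩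

lemma lookupLast_none (p : Int) (C : List (Int × Int)) (h : ∀ y ∈ C, y.1 ≠ p) :
    lookupLast p C = none := by
  induction C with
  | nil => rfl
  | cons y ys ih =>
      simp only [lookupLast, ih (fun z hz => h z (List.mem_cons_of_mem _ hz))]
      rw [if_neg (h y List.mem_cons_self)]

lemma lookupLast_last (p : Int) (C : List (Int × Int))
    (hinc : C.Pairwise (fun a b => a.2 < b.2)) (y : Int × Int) (hy : y ∈ C)
    (hp : y.1 = p) (hmax : ∀ z ∈ C, z.1 = p → z.2 ≤ y.2) :
    lookupLast p C = some y.2 := by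
  induction C with
  | nil => cases hy
  | cons z zs ih =>
      rw [List.pairwise_cons] at hinc
      rw [List.mem_cons] at hy
      simp only [lookupLast]
      rcases hy with rfl | hy
      · have hzs : ∀ w ∈ zs, w.1 ≠ p := by
          intro w hw hwp
          have h1 := hmax w (List.mem_cons_of_mem _ hw) hwp
          have h2 := hinc.1 w hw
          omega
        rw [lookupLast_none p zs hzs]
        simp [hp]
      · rw [ih hinc.2 hy (fun w hw => hmax w (List.mem_cons_of_mem _ hw))]

-- what the running-min fold computes
lemma runmin_spec (C : List (Int × Int)) (x : Int × Int)
    (hx : ∀ y ∈ C, x.2 < y.2) (hinc : C.Pairwise (fun a b => a.2 < b.2)) :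
    (List.foldl (fun a y => if y.1 ≤ a.1 then y else a) x C = x ∧ ∀ y ∈ C, x.1 < y.1) ∨
    ((List.foldl (fun a y => if y.1 ≤ a.1 then y else a) x C) ∈ C ∧
      (List.foldl (fun a y => if y.1 ≤ a.1 then y else a) x C).1 ≤ x.1 ∧
      (∀ y ∈ C, (List.foldl (fun a y => if y.1 ≤ a.1 then y else a) x C).1 ≤ y.1) ∧
      (∀ y ∈ C, y.1 = (List.foldl (fun a y => if y.1 ≤ a.1 then y else a) x C).1 →
        y.2 ≤ (List.foldl (fun a y => if y.1 ≤ a.1 then y else a) x C).2)) := by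
  induction C generalizing x with
  | nil => left; simp
  | cons y ys ih =>
      rw [List.pairwise_cons] at hinc
      simp only [List.foldl_cons]
      by_cases hp : y.1 ≤ x.1
      · rw [if_pos hp]
        right
        rcases ih y hinc.1 hinc.2 with ⟨heq, hall⟩ | ⟨hmem, hle, hall, hties⟩
        · rw [heq]
          refine ⟨List.mem_cons_self, hp, ?_, ?_⟩
          · intro z hz
            rcases List.mem_cons.mp hz with rfl | hz
            · exact le_refl _
            · exact le_of_lt (hall z hz)
          · intro z hz hzp
            rcases List.mem_cons.mp hz with rfl | hz
            · exact le_refl _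
            · exact absurd hzp (by have := hall z hz; omega)
        · refine ⟨List.mem_cons_of_mem _ hmem, le_trans hle hp, ?_, ?_⟩
          · intro z hz
            rcases List.mem_cons.mp hz with rfl | hz
            · exact hle
            · exact hall z hz
          · intro z hz hzp
            rcases List.mem_cons.mp hz with rfl | hz
            · exact le_of_lt (hinc.1 _ hmem)
            · exact hties z hz hzp
      · rw [if_neg hp]
        have hx' : ∀ z ∈ ys, x.2 < z.2 := fun z hz => hx z (List.mem_cons_of_mem _ hz)
        rcases ih x hx' hinc.2 with ⟨heq, hall⟩ | ⟨hmem, hle, hall, hties⟩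
        · left
          refine ⟨heq, ?_⟩
          intro z hz
          rcases List.mem_cons.mp hz with rfl | hz
          · omega
          · exact hall z hz
        · right
          refine ⟨List.mem_cons_of_mem _ hmem, hle, ?_, ?_⟩
          · intro z hz
            rcases List.mem_cons.mp hz with rfl | hz
            · omega
            · exact hall z hz
          · intro z hz hzp
            rcases List.mem_cons.mp hz with rfl | hz
            · exact absurd hzp (by omega)
            · exact hties z hz hzp

-- ===== VERDICT (by name: the statement is the Claim_ definition above) =====
theorem lastPerformedOp_spec : Claim_equal_lastPerformedOp := by
  intro s _ hpre
  unfold Spec_lastPerformedOp lastPerformedOp lastPerformedOp_alt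
  have hnet0 : net s.toList = 0 := by
    have h := net_eq_count s.toList
    have h2 := hpre.2
    omega
  have hscan : ∀ p : Int, p ≤ 50 →
      bScanR s.toList.reverse ((s.toList.length : Int) - 1) 0 p =
        lookupLast p (candList s.toList 0 0) := by
    intro p hp
    rw [bScanR_eq_lastFind]
    simp only [List.reverse_reverse, List.length_reverse]
    rw [show (s.toList.length : Int) - 1 - (s.toList.length : Int) + 1 = 0 by ring]
    rw [hnet0, show (0 : Int) - 0 = 0 by ring]
    exact lastFind_eq_lookupLast _ _ _ _ hp
  have hA := aLoop_eq_fold s.toList 0 0 50 (-1) (by norm_num)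
  have hres : (aLoop s.toList 0 (50, -1, 0)).2.1 =
      (List.foldl (fun a y => if y.1 ≤ a.1 then y else a) ((50 : Int), (-1 : Int))
        (candList s.toList 0 0)).2 := congrArg Prod.snd hA
  rw [hres]
  have hx : ∀ y ∈ candList s.toList 0 0, (-1 : Int) < y.2 := by
    intro y hy
    have := candList_snd_ge s.toList 0 0 y hy
    omega
  have hinc := candList_pairwise s.toList 0 0
  rcases runmin_spec (candList s.toList 0 0) ((50 : Int), (-1 : Int)) hx hinc with
    ⟨heq, hall⟩ | ⟨hmem, _, hall, hties⟩
  · -- no candidate at top level: the list is empty (all priorities are ≤ 5 < 50)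
    have hCnil : candList s.toList 0 0 = [] := by
      cases hCe : candList s.toList 0 0 with
      | nil => rfl
      | cons y ys =>
          exfalso
          have hy : y ∈ candList s.toList 0 0 := by rw [hCe]; exact List.mem_cons_self
          have hgt := hall y hy
          have hb := (candList_fst_bounds s.toList 0 0 y hy).2
          omega
    simp only [bTry, hscan 1 (by norm_num), hscan 2 (by norm_num), hscan 3 (by norm_num),
      hscan 4 (by norm_num), hscan 5 (by norm_num), hCnil, lookupLast]
    simp [hCnil]
  · set r := List.foldl (fun a y => if y.1 ≤ a.1 then y else a) ((50 : Int), (-1 : Int))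
      (candList s.toList 0 0) with hr
    have hb := candList_fst_bounds s.toList 0 0 r hmem
    have hsome : lookupLast r.1 (candList s.toList 0 0) = some r.2 :=
      lookupLast_last r.1 (candList s.toList 0 0) hinc r hmem rfl hties
    have hnone : ∀ p : Int, p < r.1 → lookupLast p (candList s.toList 0 0) = none := by
      intro p hp
      apply lookupLast_none
      intro y hy
      have := hall y hy
      omega
    simp only [bTry, hscan 1 (by norm_num), hscan 2 (by norm_num), hscan 3 (by norm_num),
      hscan 4 (by norm_num), hscan 5 (by norm_num)]
    have hcase : r.1 = 1 ∨ r.1 = 2 ∨ r.1 = 3 ∨ r.1 = 4 ∨ r.1 = 5 := by omega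
    rcases hcase with h | h | h | h | h <;> rw [h] at hsome
    · simp only [hsome]
    · simp only [hnone 1 (by omega), hsome]
    · simp only [hnone 1 (by omega), hnone 2 (by omega), hsome]
    · simp only [hnone 1 (by omega), hnone 2 (by omega), hnone 3 (by omega), hsome]
    · simp only [hnone 1 (by omega), hnone 2 (by omega), hnone 3 (by omega),
        hnone 4 (by omega), hsome]
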